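-- pv_equiv track=rewrite | github.com/bharathbhargavgb/automated-topic-recognition | pagecat2.py | boomer
-- ===== SOURCE A (Python) =====
-- def boomer(st):
--         output=""
--         for i in st:
--                 if i == '_':
--                         output += ' '
--                 else:
--                         output += i.upper()
--         return output
-- ===== SOURCE B (Python) =====
-- def boomer(st):
--     return st.upper().replace('_', ' ')
-- ===== Notes on version B (the rewrite author's own statement) =====
-- stated objective: idiomatic
-- what changed: Replaces A's per-character accumulator loop with two whole-string library passes (uppercase everything, then substitute underscores by spaces), safe because no character uppercases to or from an underscore.
import Mathlib
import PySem

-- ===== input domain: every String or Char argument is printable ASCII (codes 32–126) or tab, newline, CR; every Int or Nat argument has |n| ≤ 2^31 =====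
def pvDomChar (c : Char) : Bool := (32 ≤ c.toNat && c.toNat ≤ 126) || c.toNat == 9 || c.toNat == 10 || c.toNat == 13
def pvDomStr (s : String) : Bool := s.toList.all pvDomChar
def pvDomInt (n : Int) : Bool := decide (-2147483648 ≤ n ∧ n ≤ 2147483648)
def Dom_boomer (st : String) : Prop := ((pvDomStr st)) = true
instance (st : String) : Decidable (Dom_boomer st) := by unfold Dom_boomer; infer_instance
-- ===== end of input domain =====

-- B replaces A's per-character accumulator loop by two whole-string passes: upper() then replace('_', ' ') (idiomatic).

-- ===== PORT A =====
-- literal port of A: fold over the characters, appending ' ' for '_' and i.upper() otherwise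
def boomer (st : String) : String :=
  st.toList.foldl
    (fun output i =>
      if i = '_' then output ++ " " else output ++ PySem.Str.upper (String.singleton i))
    ""

-- ===== PORT B =====
-- literal port of B: st.upper().replace('_', ' ')
def boomer_alt (st : String) : String :=
  PySem.Str.replace (PySem.Str.upper st) "_" " "

-- ===== PRECONDITION & SPEC =====
def Spec_boomer (st : String) (out : String) : Prop := out = boomer_alt st
instance (st : String) (out : String) : Decidable (Spec_boomer st out) := by unfold Spec_boomer; infer_instance

-- ===== CLAIM (what is proved, stated in full; the proofs are below) =====
def Claim_equal_boomer : Prop := ∀ (st : String), Dom_boomer st → Spec_boomer st (boomer st)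

-- ===== LEMMAS AND PROOFS =====

-- the pointwise transformation both programs compute
def pvStep (c : Char) : Char := if c = '_' then ' ' else PySem.Chars.upperChar c

theorem pvUpperChar_eq_underscore (c : Char) :
    PySem.Chars.upperChar c = '_' ↔ c = '_' := by
  unfold PySem.Chars.upperChar PySem.Chars.islower
  split_ifs with h
  · simp only [Bool.and_eq_true, decide_eq_true_eq] at h
    have h1 : 'a'.toNat ≤ c.toNat := h.1
    have h2 : c.toNat ≤ 'z'.toNat := h.2
    have ha : 'a'.toNat = 97 := rfl
    have hz : 'z'.toNat = 122 := rfl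
    have key : (Char.ofNat (c.toNat - 32)).toNat = c.toNat - 32 := by
      unfold Char.ofNat
      rw [dif_pos (Or.inl (by omega))]
      rfl
    constructor
    · intro hc
      exfalso
      have : (Char.ofNat (c.toNat - 32)).toNat = '_'.toNat := by rw [hc]
      rw [key] at this
      have hu : '_'.toNat = 95 := rfl
      omega
    · intro hc
      subst hc
      exfalso
      have hu : '_'.toNat = 95 := rfl
      omega
  · exact Iff.rfl

-- A's loop computes the map of pvStep
theorem pvFoldA (l : List Char) (out : String) :
    (l.foldl
      (fun output i =>
        if i = '_' then output ++ " " else output ++ PySem.Str.upper (String.singleton i))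
      out).toList = out.toList ++ l.map pvStep := by
  induction l generalizing out with
  | nil => simp
  | cons c t ih =>
    simp only [List.foldl_cons, List.map_cons]
    by_cases hc : c = '_'
    · subst hc
      rw [if_pos rfl, ih]
      simp [pvStep]
    · rw [if_neg hc, ih]
      simp [pvStep, hc, PySem.Str.upper, PySem.Chars.upper]

-- replace.go with old = ['_'], new = [' '] maps '_' to ' ' pointwise
theorem pvGoSingle (l : List Char) (acc : List Char) :
    PySem.Chars.replace.go ['_'] [' '] l.length l acc =
      acc.reverse ++ l.map (fun c => if c = '_' then ' ' else c) := by
  induction l generalizing acc with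
  | nil => simp [PySem.Chars.replace.go]
  | cons c t ih =>
    by_cases hc : c = '_'
    · subst hc
      simp only [List.length_cons]
      rw [PySem.Chars.replace.go]
      simp only [List.isPrefixOf, beq_self_eq_true, Bool.true_and, if_pos]
      have : List.drop (['_'] : List Char).length ('_' :: t) = t := by simp
      rw [this]
      rw [show (([' '] : List Char).reverse ++ acc) = ' ' :: acc by simp]
      rw [ih]
      simp
    · simp only [List.length_cons]
      rw [PySem.Chars.replace.go]
      have hpre : (['_'] : List Char).isPrefixOf (c :: t) = false := by
        simp only [List.isPrefixOf, Bool.and_true, beq_eq_false_iff_ne, ne_eq]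
        exact fun h => hc h.symm
      rw [hpre]
      simp only [Bool.false_eq_true, if_false]
      rw [ih]
      simp [hc]

theorem pvReplaceUnderscore (l : List Char) :
    PySem.Chars.replace l ['_'] [' '] =
      l.map (fun c => if c = '_' then ' ' else c) := by
  unfold PySem.Chars.replace
  simp only [List.isEmpty_cons, Bool.false_eq_true, if_false]
  exact pvGoSingle l []

-- B's two passes also compute the map of pvStep
theorem pvAltToList (st : String) :
    (boomer_alt st).toList = st.toList.map pvStep := by
  unfold boomer_alt
  simp only [PySem.Str.replace, PySem.Str.upper, String.toList_ofList]
  rw [show ("_" : String).toList = ['_'] from rfl,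
      show (" " : String).toList = [' '] from rfl]
  rw [pvReplaceUnderscore]
  unfold PySem.Chars.upper
  rw [List.map_map]
  apply List.map_congr_left
  intro c _
  simp only [Function.comp_apply, pvStep]
  by_cases hc : c = '_'
  · subst hc
    rw [if_pos ((pvUpperChar_eq_underscore '_').mpr rfl), if_pos rfl]
  · rw [if_neg (fun h => hc ((pvUpperChar_eq_underscore c).mp h)), if_neg hc]

-- ===== VERDICT (by name: the statement is the Claim_ definition above) =====
theorem boomer_spec : Claim_equal_boomer := by
  intro st _
  unfold Spec_boomer
  have hA : (boomer st).toList = st.toList.map pvStep := by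
    have := pvFoldA st.toList ""
    simpa [boomer] using this
  have hB := pvAltToList st
  have : (boomer st).toList = (boomer_alt st).toList := by rw [hA, hB]
  exact String.toList_inj.mp this
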